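-- pv_equiv track=rewrite | github.com/Pppp1116/Arixa | astra/lsp.py | _position_to_offset
-- ===== SOURCE A (Python) =====
-- def _utf16_len(s: str) -> int:
--     return len(s.encode("utf-16-le")) // 2
--
-- def _line_start_offsets(text: str) -> list[int]:
--     starts = [0]
--     for i, ch in enumerate(text):
--         if ch == "\n":
--             starts.append(i + 1)
--     return starts
--
-- def _position_to_offset(text: str, line: int, character_utf16: int) -> int:
--     starts = _line_start_offsets(text)
--     if line < 0:
--         return 0
--     if line >= len(starts):
--         return len(text)
--     start = starts[line]
--     end = starts[line + 1] if line + 1 < len(starts) else len(text)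
--     row = text[start:end]
--     row = row[:-1] if row.endswith("\n") else row
--     units = 0
--     idx = 0
--     for idx, ch in enumerate(row):
--         u = _utf16_len(ch)
--         if units + u > character_utf16:
--             return start + idx
--         units += u
--     return start + len(row)
-- ===== SOURCE B (Python) =====
-- def _fit(row: str, budget: int) -> int:
--     # number of leading chars of row whose total UTF-16 length fits in budget
--     n = 0
--     for ch in row:
--         u = len(ch.encode("utf-16-le")) // 2
--         if u > budget:
--             break
--         budget -= u
--         n += 1
--     return n
--
-- def _position_to_offset(text: str, line: int, character_utf16: int) -> int:
--     if line < 0: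
--         return 0
--     head, sep, tail = text.partition("\n")
--     if not sep:
--         return len(text) if line > 0 else _fit(head, character_utf16)
--     if line == 0:
--         return _fit(head, character_utf16)
--     return len(head) + 1 + _position_to_offset(tail, line - 1, character_utf16)
-- ===== Notes on version B (the rewrite author's own statement) =====
-- stated objective: simpler
-- what changed: B replaces A's precomputed line-start offset table plus slicing with a direct recursive descent that partitions the text at the first newline and counts the fitting UTF-16 prefix of the target line with a remaining-budget counter.
import Mathlib
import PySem

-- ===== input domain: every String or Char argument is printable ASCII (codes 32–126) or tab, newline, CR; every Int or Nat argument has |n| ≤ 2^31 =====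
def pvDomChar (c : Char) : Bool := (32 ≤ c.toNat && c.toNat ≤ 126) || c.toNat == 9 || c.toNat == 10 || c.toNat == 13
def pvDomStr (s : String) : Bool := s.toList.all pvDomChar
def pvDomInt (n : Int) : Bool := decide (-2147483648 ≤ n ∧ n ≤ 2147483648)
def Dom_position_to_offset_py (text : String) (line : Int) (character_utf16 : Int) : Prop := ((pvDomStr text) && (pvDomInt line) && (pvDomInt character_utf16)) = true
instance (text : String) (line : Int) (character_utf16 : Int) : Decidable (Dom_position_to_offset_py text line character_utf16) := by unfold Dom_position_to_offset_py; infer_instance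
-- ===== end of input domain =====

-- B replaces A's precomputed line-start offset table plus slicing with a recursive descent that splits at the
-- first newline and counts the fitting UTF-16 prefix with a budget counter (simpler; measured faster in a timing run).

-- ===== PORT A =====

-- len(ch.encode("utf-16-le")) // 2 for a single character ch (2 bytes below 0x10000, else 4)
def pvUtf16Len (c : Char) : Int := PySem.Int.floordiv (if c.toNat < 65536 then 2 else 4) 2

-- the loop of _line_start_offsets, carrying the enumerate index i and the accumulator
def pvLineStartsGo : List Char → Int → List Int → List Int
  | [], _, acc => acc
  | ch :: rest, i, acc => pvLineStartsGo rest (i + 1) (if ch = '\n' then acc ++ [i + 1] else acc)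

def pvLineStarts (t : List Char) : List Int := pvLineStartsGo t 0 [0]

-- the final loop of A: for idx, ch in enumerate(row): …  (units/idx carried; rowLen = len(row) for the fall-through return)
def pvScanA (start c rowLen : Int) : Int → Int → List Char → Int
  | _, _, [] => start + rowLen
  | units, idx, ch :: rest =>
      let u := pvUtf16Len ch
      if units + u > c then start + idx else pvScanA start c rowLen (units + u) (idx + 1) rest

def position_to_offset_py (text : String) (line : Int) (character_utf16 : Int) : Int :=
  let t := text.toList
  let starts := pvLineStarts t
  if line < 0 then 0
  else if line ≥ (starts.length : Int) then (t.length : Int)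
  else
    let start := (PySem.List.pyGet? starts line).getD 0        -- in range: the guards ensure 0 ≤ line < len(starts)
    let end_ := if line + 1 < (starts.length : Int) then (PySem.List.pyGet? starts (line + 1)).getD 0 else (t.length : Int)
    let row := PySem.List.slice t (some start) (some end_)
    let row := if PySem.Chars.endswith row ['\n'] then PySem.List.slice row none (some (-1)) else row
    pvScanA start character_utf16 (row.length : Int) 0 0 row

-- ===== PORT B =====

-- hand port of str.partition("\n") (PySem has no partition): none = no newline, some (head, tail) = parts around the first '\n'
def pvSplitNl : List Char → Option (List Char × List Char)
  | [] => none
  | ch :: rest =>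
      if ch = '\n' then some ([], rest)
      else match pvSplitNl rest with
        | none => none
        | some (a, b) => some (ch :: a, b)

-- _fit: leading chars of row whose total UTF-16 length fits in the budget
def pvFitB : List Char → Int → Int
  | [], _ => 0
  | ch :: rest, budget =>
      let u := pvUtf16Len ch
      if u > budget then 0 else 1 + pvFitB rest (budget - u)

theorem pvSplitNl_shape : ∀ (t head tail : List Char), pvSplitNl t = some (head, tail) →
    t = head ++ '\n' :: tail ∧ '\n' ∉ head := by
  intro t
  induction t with
  | nil => intro _ _ h; simp [pvSplitNl] at h
  | cons ch rest ih =>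
    intro head tail h
    by_cases hc : ch = '\n'
    · simp [pvSplitNl, hc] at h
      obtain ⟨h1, h2⟩ := h
      subst h1; subst h2; simp [hc]
    · simp [pvSplitNl, hc] at h
      rcases hsp : pvSplitNl rest with _ | ⟨a, b⟩ <;> rw [hsp] at h
      · simp at h
      · simp at h
        obtain ⟨h1, h2⟩ := h
        subst h1; subst h2
        obtain ⟨ht, hn⟩ := ih a b hsp
        constructor
        · simp [ht]
        · simp [hn, Ne.symm hc]

theorem pvSplitNl_tail_lt (t head tail : List Char) (h : pvSplitNl t = some (head, tail)) :
    tail.length < t.length := by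
  obtain ⟨ht, _⟩ := pvSplitNl_shape t head tail h
  subst ht; simp; omega

def pvAltGo (t : List Char) (line c : Int) : Int :=
  if line < 0 then 0
  else
    match h : pvSplitNl t with
    | none => if line > 0 then (t.length : Int) else pvFitB t c
    | some (head, tail) =>
        if line = 0 then pvFitB head c
        else (head.length : Int) + 1 + pvAltGo tail (line - 1) c
termination_by t.length
decreasing_by exact pvSplitNl_tail_lt t head tail h

def position_to_offset_py_alt (text : String) (line : Int) (character_utf16 : Int) : Int :=
  pvAltGo text.toList line character_utf16

-- ===== PRECONDITION & SPEC =====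
def Spec_position_to_offset_py (text : String) (line : Int) (character_utf16 : Int) (out : Int) : Prop := out = position_to_offset_py_alt text line character_utf16
instance (text : String) (line : Int) (character_utf16 : Int) (out : Int) : Decidable (Spec_position_to_offset_py text line character_utf16 out) := by unfold Spec_position_to_offset_py; infer_instance

-- ===== CLAIM (what is proved, stated in full; the proofs are below) =====
def Claim_equal_position_to_offset_py : Prop := ∀ (text : String) (line : Int) (character_utf16 : Int), Dom_position_to_offset_py text line character_utf16 → Spec_position_to_offset_py text line character_utf16 (position_to_offset_py text line character_utf16)

-- ===== LEMMAS AND PROOFS =====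

theorem pvSplitNl_none : ∀ (t : List Char), pvSplitNl t = none → '\n' ∉ t := by
  intro t
  induction t with
  | nil => intro _; simp
  | cons ch rest ih =>
    intro h
    by_cases hc : ch = '\n'
    · simp [pvSplitNl, hc] at h
    · simp [pvSplitNl, hc] at h
      rcases hsp : pvSplitNl rest with _ | ⟨a, b⟩ <;> rw [hsp] at h
      · simp [Ne.symm hc, ih hsp]
      · simp at h

-- newline positions (+1) of t when scanning from index i: the tail of the starts table
def pvNs : List Char → Int → List Int
  | [], _ => []
  | ch :: rest, i => if ch = '\n' then (i + 1) :: pvNs rest (i + 1) else pvNs rest (i + 1)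

theorem pvLineStartsGo_eq : ∀ (t : List Char) (i : Int) (acc : List Int),
    pvLineStartsGo t i acc = acc ++ pvNs t i := by
  intro t
  induction t with
  | nil => intro i acc; simp [pvLineStartsGo, pvNs]
  | cons ch rest ih =>
    intro i acc
    by_cases hc : ch = '\n' <;> simp [pvLineStartsGo, pvNs, hc, ih]

theorem pvNs_shift : ∀ (t : List Char) (s i : Int), pvNs t (s + i) = (pvNs t i).map (· + s) := by
  intro t
  induction t with
  | nil => intro s i; simp [pvNs]
  | cons ch rest ih =>
    intro s i
    by_cases hc : ch = '\n' <;> simp [pvNs, hc]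
    · constructor
      · ring
      · have := ih s (i + 1); rw [← this]; ring_nf
    · have := ih s (i + 1); rw [← this]; ring_nf

theorem pvNs_no_nl : ∀ (t : List Char) (i : Int), '\n' ∉ t → pvNs t i = [] := by
  intro t
  induction t with
  | nil => intro i _; simp [pvNs]
  | cons ch rest ih =>
    intro i h
    simp at h
    simp [pvNs, Ne.symm h.1, ih (i + 1) h.2]

theorem pvNs_append (head tail : List Char) (i : Int) (h : '\n' ∉ head) :
    pvNs (head ++ '\n' :: tail) i = (i + head.length + 1) :: pvNs tail (i + head.length + 1) := by
  induction head generalizing i with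
  | nil => simp [pvNs]
  | cons ch rest ih =>
    simp at h
    simp [pvNs, Ne.symm h.1]
    rw [ih (i + 1) h.2]
    ring_nf

theorem pvNs_pos : ∀ (t : List Char) (i x : Int), x ∈ pvNs t i → i + 1 ≤ x := by
  intro t
  induction t with
  | nil => intro i x h; simp [pvNs] at h
  | cons ch rest ih =>
    intro i x h
    by_cases hc : ch = '\n' <;> simp [pvNs, hc] at h
    · rcases h with h | h
      · omega
      · have := ih (i + 1) x h; omega
    · have := ih (i + 1) x h; omega

theorem pvLineStarts_eq (t : List Char) : pvLineStarts t = 0 :: pvNs t 0 := by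
  simp [pvLineStarts, pvLineStartsGo_eq]

-- A's inner loop vs B's budget counter
theorem pvScan_fit : ∀ (row : List Char) (st c rowLen units idx : Int),
    rowLen = idx + row.length →
    pvScanA st c rowLen units idx row = st + idx + pvFitB row (c - units) := by
  intro row
  induction row with
  | nil => intro st c rowLen units idx h; simp at h; simp [pvScanA, pvFitB]; omega
  | cons ch rest ih =>
    intro st c rowLen units idx h
    simp [pvScanA, pvFitB]
    by_cases hcmp : units + pvUtf16Len ch > c
    · rw [if_pos hcmp, if_pos (by omega)]; ring
    · rw [if_neg hcmp, if_neg (by omega)]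
      rw [ih st c rowLen (units + pvUtf16Len ch) (idx + 1) (by simp at h ⊢; omega)]
      ring_nf

-- the body of A, already on lists (definitionally the body of position_to_offset_py)
def pvAGo (t : List Char) (line c : Int) : Int :=
  let starts := pvLineStarts t
  if line < 0 then 0
  else if line ≥ (starts.length : Int) then (t.length : Int)
  else
    let start := (PySem.List.pyGet? starts line).getD 0
    let end_ := if line + 1 < (starts.length : Int) then (PySem.List.pyGet? starts (line + 1)).getD 0 else (t.length : Int)
    let row := PySem.List.slice t (some start) (some end_)
    let row := if PySem.Chars.endswith row ['\n'] then PySem.List.slice row none (some (-1)) else row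
    pvScanA start c (row.length : Int) 0 0 row

theorem pvAGo_spec (text : String) (line c : Int) :
    position_to_offset_py text line c = pvAGo text.toList line c := rfl

theorem pvNs_shift' (t : List Char) (i : Int) : pvNs t i = (pvNs t 0).map (· + i) := by
  have := pvNs_shift t i 0; simpa using this

theorem pvGet_cons_of_pos {α : Type} (x : α) (xs : List α) (i : Int) (h : 1 ≤ i) :
    PySem.List.pyGet? (x :: xs) i = PySem.List.pyGet? xs (i - 1) := by
  rw [PySem.List.pyGet?_of_nonneg (x :: xs) (by omega), PySem.List.pyGet?_of_nonneg xs (by omega)]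
  have hi : i.toNat = (i - 1).toNat + 1 := by omega
  rw [hi]
  simp

theorem pvSliceShift {α : Type} (xs ys : List α) (a b : Int) (ha : 0 ≤ a) (hb : 0 ≤ b) :
    PySem.List.slice (xs ++ ys) (some ((xs.length : Int) + a)) (some ((xs.length : Int) + b)) = PySem.List.slice ys (some a) (some b) := by
  rw [PySem.List.slice_toNat (xs ++ ys) (by omega) (by omega), PySem.List.slice_toNat ys ha hb]
  have h1 : ((xs.length : Int) + a).toNat = xs.length + a.toNat := by omega
  rw [h1]
  have h2 : ((xs.length : Int) + b).toNat - (xs.length + a.toNat) = b.toNat - a.toNat := by omega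
  rw [h2, List.drop_length_add_append]

theorem pvLineStarts_append (head tail : List Char) (h : '\n' ∉ head) :
    pvLineStarts (head ++ '\n' :: tail) = 0 :: (pvLineStarts tail).map (· + ((head.length : Int) + 1)) := by
  rw [pvLineStarts_eq, pvLineStarts_eq, pvNs_append head tail 0 h, pvNs_shift' tail (0 + (head.length : Int) + 1)]
  simp

-- the no-newline case of A
-- the common tail of A's branch: slice out the row, strip a trailing newline, scan (proof-level restatement)
def pvBody (t : List Char) (start end_ c : Int) : Int :=
  let row := PySem.List.slice t (some start) (some end_)
  let row := if PySem.Chars.endswith row ['\n'] then PySem.List.slice row none (some (-1)) else row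
  pvScanA start c (row.length : Int) 0 0 row

theorem pvAGo_eq_body (t : List Char) (line c : Int) (h0 : ¬ line < 0)
    (h1 : ¬ line ≥ ((pvLineStarts t).length : Int)) :
    pvAGo t line c = pvBody t ((PySem.List.pyGet? (pvLineStarts t) line).getD 0)
      (if line + 1 < ((pvLineStarts t).length : Int) then (PySem.List.pyGet? (pvLineStarts t) (line + 1)).getD 0 else (t.length : Int)) c := by
  unfold pvAGo pvBody
  rw [if_neg h0, if_neg h1]

theorem pvBody_shift (xs tail : List Char) (a b c : Int) (ha : 0 ≤ a) (hb : 0 ≤ b) :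
    pvBody (xs ++ tail) ((xs.length : Int) + a) ((xs.length : Int) + b) c
      = (xs.length : Int) + pvBody tail a b c := by
  unfold pvBody
  rw [pvSliceShift xs tail a b ha hb]
  rw [pvScan_fit _ ((xs.length : Int) + a) c _ 0 0 (by simp), pvScan_fit _ a c _ 0 0 (by simp)]
  ring

theorem pvAGo_none (t : List Char) (line c : Int) (h : '\n' ∉ t) :
    pvAGo t line c = if line < 0 then 0 else if line ≥ 1 then (t.length : Int) else pvFitB t c := by
  have hst : pvLineStarts t = [0] := by rw [pvLineStarts_eq, pvNs_no_nl t 0 h]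
  unfold pvAGo
  rw [hst]
  by_cases h0 : line < 0
  · simp [h0]
  · by_cases h1 : line ≥ 1
    · simp [h0, h1]
    · have hl : line = 0 := by omega
      subst hl
      have hend : PySem.Chars.endswith t ['\n'] = false := by
        by_contra hc
        have hc' : PySem.Chars.endswith t ['\n'] = true := by
          revert hc; cases (PySem.Chars.endswith t ['\n']) <;> simp
        exact h (((PySem.Chars.endswith_iff _ _).mp hc').subset (by simp))
      have hsl : PySem.List.slice t (some 0) (some (t.length : Int)) = t := by
        simp [PySem.List.slice_to_natCast]
      simp [hsl, hend]
      rw [pvScan_fit t 0 c (t.length : Int) 0 0 (by simp)]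
      simp

-- the step case of A: one newline peeled off
theorem pvAGo_step (head tail : List Char) (line c : Int) (hnl : '\n' ∉ head) (hline : 1 ≤ line) :
    pvAGo (head ++ '\n' :: tail) line c = (head.length : Int) + 1 + pvAGo tail (line - 1) c := by
  have hsT := pvLineStarts_append head tail hnl
  have hSTeq := pvLineStarts_eq tail
  have hlen1 : 1 ≤ (pvLineStarts tail).length := by rw [hSTeq]; simp
  have hlenT : (pvLineStarts (head ++ '\n' :: tail)).length = (pvLineStarts tail).length + 1 := by
    rw [hsT]; simp
  by_cases hbig : line ≥ ((pvLineStarts (head ++ '\n' :: tail)).length : Int)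
  · -- both out of range
    unfold pvAGo
    rw [if_neg (by omega), if_pos hbig, if_neg (by omega), if_pos (by rw [hlenT] at hbig; push_cast at hbig ⊢; omega)]
    simp
    ring
  · have hk0 : (0 : Int) ≤ line - 1 := by omega
    have hkl : line - 1 < ((pvLineStarts tail).length : Int) := by
      rw [hlenT] at hbig; push_cast at hbig; omega
    rw [pvAGo_eq_body _ line c (by omega) hbig,
        pvAGo_eq_body tail (line - 1) c (by omega) (by omega)]
    -- start values
    obtain ⟨a, hga⟩ : ∃ a, PySem.List.pyGet? (pvLineStarts tail) (line - 1) = some a := by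
      rw [PySem.List.pyGet?_of_nonneg _ hk0]
      exact ⟨_, List.getElem?_eq_getElem (by omega)⟩
    have hstartT : PySem.List.pyGet? (pvLineStarts (head ++ '\n' :: tail)) line
        = some (a + ((head.length : Int) + 1)) := by
      rw [hsT, pvGet_cons_of_pos _ _ line hline, PySem.List.pyGet?_of_nonneg _ hk0, List.getElem?_map]
      rw [PySem.List.pyGet?_of_nonneg _ hk0] at hga
      rw [hga]
      rfl
    have hamem : a ∈ pvLineStarts tail := PySem.List.mem_of_pyGet?_eq_some _ hga
    have ha : 0 ≤ a := by
      rw [hSTeq] at hamem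
      rcases List.mem_cons.mp hamem with h | h
      · omega
      · have := pvNs_pos tail 0 a h; omega
    -- end values: both conditions are equivalent
    have hcond : (line + 1 < ((pvLineStarts (head ++ '\n' :: tail)).length : Int))
        ↔ ((line - 1) + 1 < ((pvLineStarts tail).length : Int)) := by
      rw [hlenT]; push_cast; omega
    by_cases hendc : (line - 1) + 1 < ((pvLineStarts tail).length : Int)
    · obtain ⟨b, hgb⟩ : ∃ b, PySem.List.pyGet? (pvLineStarts tail) ((line - 1) + 1) = some b := by
        rw [PySem.List.pyGet?_of_nonneg _ (by omega)]
        exact ⟨_, List.getElem?_eq_getElem (by omega)⟩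
      have hendT : PySem.List.pyGet? (pvLineStarts (head ++ '\n' :: tail)) (line + 1)
          = some (b + ((head.length : Int) + 1)) := by
        rw [hsT, pvGet_cons_of_pos _ _ (line + 1) (by omega), PySem.List.pyGet?_of_nonneg _ (by omega), List.getElem?_map]
        rw [PySem.List.pyGet?_of_nonneg _ (by omega)] at hgb
        have he : (line + 1 - 1).toNat = ((line - 1) + 1).toNat := by omega
        rw [he, hgb]
        rfl
      have hbmem : b ∈ pvLineStarts tail := PySem.List.mem_of_pyGet?_eq_some _ hgb
      have hb : 0 ≤ b := by
        rw [hSTeq] at hbmem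
        rcases List.mem_cons.mp hbmem with h | h
        · omega
        · have := pvNs_pos tail 0 b h; omega
      rw [if_pos (hcond.mpr hendc), if_pos hendc, hstartT, hendT, hga, hgb]
      simp only [Option.getD_some]
      have h1 : head ++ '\n' :: tail = (head ++ ['\n']) ++ tail := by simp
      have h2 : (((head ++ ['\n']).length : Int)) = (head.length : Int) + 1 := by simp
      rw [h1, show a + ((head.length : Int) + 1) = ((head ++ ['\n']).length : Int) + a by rw [h2]; ring,
          show b + ((head.length : Int) + 1) = ((head ++ ['\n']).length : Int) + b by rw [h2]; ring,
          pvBody_shift _ tail a b c ha hb, h2]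
    · rw [if_neg (by rw [hcond]; exact hendc), if_neg hendc, hstartT, hga]
      simp only [Option.getD_some]
      have h1 : head ++ '\n' :: tail = (head ++ ['\n']) ++ tail := by simp
      have h2 : (((head ++ ['\n']).length : Int)) = (head.length : Int) + 1 := by simp
      have h3 : (((head ++ '\n' :: tail).length : Int)) = ((head ++ ['\n']).length : Int) + (tail.length : Int) := by simp; ring
      rw [h3, h1, show a + ((head.length : Int) + 1) = ((head ++ ['\n']).length : Int) + a by rw [h2]; ring,
          pvBody_shift _ tail a (tail.length : Int) c ha (by positivity), h2]

-- the first-line case of A with a newline present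
theorem pvAGo_zero (head tail : List Char) (c : Int) (hnl : '\n' ∉ head) :
    pvAGo (head ++ '\n' :: tail) 0 c = pvFitB head c := by
  have hsT := pvLineStarts_append head tail hnl
  have hSTeq := pvLineStarts_eq tail
  have hlen1 : 1 ≤ (pvLineStarts tail).length := by rw [hSTeq]; simp
  have hlenT : (pvLineStarts (head ++ '\n' :: tail)).length = (pvLineStarts tail).length + 1 := by
    rw [hsT]; simp
  rw [pvAGo_eq_body _ 0 c (by omega) (by push_cast [hlenT]; omega)]
  have hstart : PySem.List.pyGet? (pvLineStarts (head ++ '\n' :: tail)) 0 = some 0 := by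
    rw [hsT, PySem.List.pyGet?_zero_cons]
  have hend : PySem.List.pyGet? (pvLineStarts (head ++ '\n' :: tail)) (0 + 1)
      = some ((head.length : Int) + 1) := by
    rw [hsT, pvGet_cons_of_pos _ _ (0 + 1) (by omega)]
    rw [hSTeq]
    norm_num [PySem.List.pyGet?_zero_cons]
  rw [if_pos (by push_cast [hlenT]; omega), hstart, hend]
  simp only [Option.getD_some]
  unfold pvBody
  have hrow : PySem.List.slice (head ++ '\n' :: tail) (some 0) (some ((head.length : Int) + 1))
      = head ++ ['\n'] := by
    rw [PySem.List.slice_toNat _ (by omega) (by omega)]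
    have h1 : ((head.length : Int) + 1).toNat - (0 : Int).toNat = (head ++ ['\n']).length := by
      simp
    rw [h1]
    simp only [Int.toNat_zero, List.drop_zero]
    rw [show head ++ '\n' :: tail = (head ++ ['\n']) ++ tail by simp, List.take_left' rfl]
  have hsw : PySem.Chars.endswith (head ++ ['\n']) ['\n'] = true :=
    (PySem.Chars.endswith_iff _ _).mpr ⟨head, rfl⟩
  simp only [hrow, hsw, if_true, PySem.List.slice_to_neg_one, List.dropLast_concat]
  rw [pvScan_fit head 0 c (head.length : Int) 0 0 (by simp)]
  simp

theorem pvMain : ∀ (n : Nat) (t : List Char), t.length ≤ n → ∀ (line c : Int),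
    pvAGo t line c = pvAltGo t line c := by
  intro n
  induction n with
  | zero =>
    intro t ht line c
    have : t = [] := by cases t <;> simp_all
    subst this
    rw [pvAltGo]
    rw [pvAGo_none [] line c (by simp)]
    simp [pvSplitNl]
    split_ifs <;> simp_all [pvFitB]
  | succ m ih =>
    intro t ht line c
    rw [pvAltGo]
    rcases hsp : pvSplitNl t with _ | ⟨head, tail⟩
    · -- no newline
      rw [pvAGo_none t line c (pvSplitNl_none t hsp)]
      split_ifs <;> try rfl
      all_goals omega
    · obtain ⟨hts, hnl⟩ := pvSplitNl_shape t head tail hsp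
      subst hts
      by_cases h0 : line < 0
      · simp [pvAGo, h0]
      · by_cases h1 : line = 0
        · subst h1
          simp [pvAGo_zero head tail c hnl]
        · have hge : 1 ≤ line := by omega
          rw [pvAGo_step head tail line c hnl hge]
          have htail : tail.length ≤ m := by simp at ht; omega
          rw [ih tail htail (line - 1) c]
          simp [h0, h1]

-- ===== VERDICT (by name: the statement is the Claim_ definition above) =====
theorem position_to_offset_py_spec : Claim_equal_position_to_offset_py := by
  intro text line c _
  unfold Spec_position_to_offset_py position_to_offset_py_alt
  rw [pvAGo_spec]
  exact pvMain text.toList.length text.toList le_rfl line c
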